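-- pv_equiv track=rewrite | github.com/flycatcher/relue-tcejorp | p095/src/solution.py | rdf
-- ===== SOURCE A (Python) =====
-- def rdf(limit):
--     """
--     Returns the sum of all proper (aliquot) divisors for each integer up to the
--     given upper bound (exclusive)
--     """
--     sieve = [1] * limit
--     sieve[0] = 0
--     for n in range(2, limit, 2):
--         x = 1
--         (q, r) = divmod(n, 2)
--         while r == 0:
--             x += 1
--             (q, r) = divmod(q, 2)
--         sieve[n] *= (2 ** x - 1)
--     for n in range(3, limit, 2):
--         if sieve[n] == 1:
--             d = n - 1
--             for m in range(n, limit, n):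
--                 x = 1
--                 (q, r) = divmod(m, n)
--                 while r == 0:
--                     x += 1
--                     (q, r) = divmod(q, n)
--                 sieve[m] *= (n ** x - 1) // d
--     for n in range(limit):
--         sieve[n] -= n
--     return sieve
-- ===== SOURCE B (Python) =====
-- def rdf(limit):
--     """
--     Returns the sum of all proper (aliquot) divisors for each integer up to the
--     given upper bound (exclusive)
--     """
--     sieve = [0] * limit
--     for d in range(1, limit):
--         for m in range(2 * d, limit, d):
--             sieve[m] += d
--     return sieve
-- ===== Notes on version B (the rewrite author's own statement) =====
-- stated objective: simpler
-- what changed: Replaces the multiplicative prime-power sigma sieve (trial prime detection, per-prime multiplicity while-loops, geometric-sum factors, final subtraction of n) by a direct additive sieve that adds each d to every proper multiple of d, so each entry is the sum of proper divisors by construction.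
-- outside the precondition, e.g. on rdf(0): A raises IndexError, B returns []
import Mathlib
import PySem

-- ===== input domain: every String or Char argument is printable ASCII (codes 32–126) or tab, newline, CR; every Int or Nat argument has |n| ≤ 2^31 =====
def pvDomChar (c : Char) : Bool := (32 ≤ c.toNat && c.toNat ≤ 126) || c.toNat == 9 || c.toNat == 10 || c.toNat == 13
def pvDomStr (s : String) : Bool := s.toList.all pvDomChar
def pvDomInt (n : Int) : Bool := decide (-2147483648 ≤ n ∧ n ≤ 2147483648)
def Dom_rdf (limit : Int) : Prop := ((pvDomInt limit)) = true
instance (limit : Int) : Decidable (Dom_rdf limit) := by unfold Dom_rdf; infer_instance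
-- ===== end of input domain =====

-- B replaces A's multiplicative prime-power sigma sieve by a direct additive sieve over
-- proper divisors (objective: simpler; same return values on 1 ≤ limit, B returns [] where A raises).

-- ===== PORT A =====

-- 'x = 1; (q, r) = divmod(n, p); while r == 0: x += 1; (q, r) = divmod(q, p)'.
-- Fuel-bounded loop; on every state the Python reaches we have 2 ≤ p and, whenever the loop
-- continues, 1 ≤ q, so the fuel n.natAbs + 1 given by rdfX is never exhausted there (exact).
def rdfWhile (p : Int) : Nat → Int → Int → Int → Int
  | 0, x, _, _ => x
  | fuel+1, x, q, r =>
      if r = 0 then rdfWhile p fuel (x + 1) (PySem.Int.floordiv q p) (PySem.Int.mod q p)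
      else x

def rdfX (p n : Int) : Int :=
  rdfWhile p (n.natAbs + 1) 1 (PySem.Int.floordiv n p) (PySem.Int.mod n p)

def rdf (limit : Int) : List Int :=
  -- sieve = [1] * limit; sieve[0] = 0  (IndexError when limit ≤ 0: those inputs are outside Pre_)
  let s0 := PySem.List.pySetD (List.replicate limit.toNat 1) 0 0
  -- for n in range(2, limit, 2): … sieve[n] *= (2 ** x - 1)   (x ≥ 1 always, so '^ x.toNat' is exact)
  let s1 := (PySem.List.pyRange 2 limit 2).foldl (fun s n =>
      let x := rdfX 2 n
      PySem.List.pySetD s n (PySem.List.pyGetD s n 0 * ((2 : Int) ^ x.toNat - 1))) s0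
  -- for n in range(3, limit, 2): if sieve[n] == 1: d = n - 1; for m in range(n, limit, n): …
  let s2 := (PySem.List.pyRange 3 limit 2).foldl (fun s n =>
      if PySem.List.pyGetD s n 0 = 1 then
        let d := n - 1
        (PySem.List.pyRange n limit n).foldl (fun s m =>
            let x := rdfX n m
            PySem.List.pySetD s m (PySem.List.pyGetD s m 0 *
              PySem.Int.floordiv (n ^ x.toNat - 1) d)) s
      else s) s1
  -- for n in range(limit): sieve[n] -= n
  (PySem.List.pyRange 0 limit 1).foldl (fun s n =>
      PySem.List.pySetD s n (PySem.List.pyGetD s n 0 - n)) s2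

-- ===== PORT B =====
def rdf_alt (limit : Int) : List Int :=
  -- sieve = [0] * limit; for d in range(1, limit): for m in range(2*d, limit, d): sieve[m] += d
  (PySem.List.pyRange 1 limit 1).foldl (fun s d =>
      (PySem.List.pyRange (2 * d) limit d).foldl (fun s m =>
          PySem.List.pySetD s m (PySem.List.pyGetD s m 0 + d)) s)
    (List.replicate limit.toNat 0)

-- ===== PRECONDITION & SPEC =====
-- Pre_ excludes exactly limit ≤ 0, where A's 'sieve[0] = 0' raises IndexError on the empty list.
def Pre_rdf (limit : Int) : Prop := 1 ≤ limit
instance (limit : Int) : Decidable (Pre_rdf limit) := by unfold Pre_rdf; infer_instance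
def pvWitness_rdf : Int := 10

def Spec_rdf (limit : Int) (out : List Int) : Prop := out = rdf_alt limit
instance (limit : Int) (out : List Int) : Decidable (Spec_rdf limit out) := by unfold Spec_rdf; infer_instance

-- ===== CLAIM (what is proved, stated in full; the proofs are below) =====
def Claim_equal_rdf : Prop := ∀ (limit : Int), Dom_rdf limit → Pre_rdf limit → Spec_rdf limit (rdf limit)

-- ===== LEMMAS AND PROOFS =====

-- σ₁, the sum of all divisors
def sigma1 (n : ℕ) : ℕ := ∑ d ∈ n.divisors, d

-- partial product of A's sieve: prime-power σ factors for p = 2 and the odd primes below a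
def PA (a j : ℕ) : ℕ :=
  ∏ p ∈ j.primeFactors.filter (fun p => p = 2 ∨ p < a), sigma1 (p ^ j.factorization p)

-- partial sum of B's sieve: proper divisors below a
def BV (a j : ℕ) : ℕ := ∑ x ∈ Finset.range a, if x ∣ j ∧ x < j then x else 0

-- the common value: sum of proper divisors at every index below N
def tgt (N : ℕ) : List ℤ := (List.range N).map (fun j => ((∑ i ∈ j.properDivisors, i : ℕ) : ℤ))

theorem scatter (f : ℤ → ℤ → ℤ) :
    ∀ (idxs : List ℤ) (s : List ℤ),
      idxs.Nodup →
      (∀ i ∈ idxs, 0 ≤ i ∧ i < (s.length : ℤ)) →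
      (idxs.foldl (fun t i => PySem.List.pySetD t i (f i (PySem.List.pyGetD t i 0))) s).length = s.length ∧
      ∀ j : ℕ, j < s.length →
        (idxs.foldl (fun t i => PySem.List.pySetD t i (f i (PySem.List.pyGetD t i 0))) s).getD j 0 =
          if (j : ℤ) ∈ idxs then f j (s.getD j 0) else s.getD j 0 := by
  intro idxs
  induction idxs with
  | nil => intro s _ _; simp
  | cons i rest ih =>
    intro s hnd hin
    have hi : 0 ≤ i ∧ i < (s.length : ℤ) := hin i (by simp)
    have hnd' : rest.Nodup := hnd.of_cons
    have hinotin : i ∉ rest := by simp at hnd; exact hnd.1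
    set v := f i (PySem.List.pyGetD s i 0) with hv
    have hstep : PySem.List.pySetD s i v = s.set i.toNat v := PySem.List.pySetD_of_nonneg s v hi.1
    have hlen' : (s.set i.toNat v).length = s.length := by simp
    have hin' : ∀ x ∈ rest, 0 ≤ x ∧ x < ((s.set i.toNat v).length : ℤ) := by
      intro x hx; rw [hlen']; exact hin x (by simp [hx])
    have IH := ih (s.set i.toNat v) hnd' hin'
    simp only [List.foldl_cons, ← hv, hstep]
    constructor
    · rw [IH.1, hlen']
    · intro j hj
      rw [IH.2 j (by omega)]
      have hgetset : ∀ k : ℕ, k < s.length →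
          (s.set i.toNat v).getD k 0 = if k = i.toNat then v else s.getD k 0 := by
        intro k hk
        have hilen : i.toNat < s.length := by omega
        rcases eq_or_ne k i.toNat with he | hne
        · subst he
          simp [List.getD_eq_getElem?_getD, hilen]
        · simp [List.getD_eq_getElem?_getD, hne, Ne.symm hne]
      by_cases hjr : (j : ℤ) ∈ rest
      · have hji : (j : ℤ) ≠ i := fun he => hinotin (he ▸ hjr)
        have : ¬ (j = i.toNat) := by omega
        rw [if_pos hjr, hgetset j hj, if_neg this, if_pos (by simp [hjr])]
      · by_cases hje : (j : ℤ) = i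
        · have hj' : j = i.toNat := by omega
          rw [if_neg hjr, hgetset j hj, if_pos hj', if_pos (by simp [hje]), hv]
          rw [PySem.List.pyGetD_eq_getElem s 0 hi.1 hi.2, List.getD_eq_getElem s 0 (n := j) hj]
          congr 2 <;> omega
        · rw [if_neg hjr, hgetset j hj, if_neg (by omega), if_neg (by simp [hje, hjr])]


theorem nodup_pyRange_pos (a b s : ℤ) (hs : 0 < s) : (PySem.List.pyRange a b s).Nodup := by
  rw [PySem.List.pyRange_of_pos a b hs]
  refine List.Nodup.map ?_ (List.nodup_range)
  intro x y hxy
  simp only [add_right_inj] at hxy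
  exact_mod_cast mul_left_cancel₀ (by omega : s ≠ 0) hxy

theorem pyRange_two_cons {a b : ℤ} (h : a < b) :
    PySem.List.pyRange a b 2 = a :: PySem.List.pyRange (a + 2) b 2 := by
  rw [PySem.List.pyRange_of_pos a b (by omega), PySem.List.pyRange_of_pos (a+2) b (by omega)]
  simp only [if_pos h]
  have hM : ((b - a + 2 - 1) / 2).toNat = (if a + 2 < b then ((b - (a+2) + 2 - 1) / 2).toNat else 0) + 1 := by
    split_ifs <;> omega
  rw [hM, List.range_succ_eq_map, List.map_cons, List.map_map]
  refine congrArg₂ _ (by ring) ?_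
  apply List.map_congr_left
  intro k _
  simp only [Function.comp_apply, Nat.succ_eq_add_one]
  push_cast
  ring

theorem rdfWhile_spec (p : ℕ) (hp : p.Prime) :
    ∀ (n : ℕ), 1 ≤ n → ∀ (fuel : ℕ), n ≤ fuel → ∀ (x : ℤ),
      rdfWhile (p : ℤ) fuel x (PySem.Int.floordiv (n : ℤ) (p : ℤ)) (PySem.Int.mod (n : ℤ) (p : ℤ)) =
        x + (n.factorization p : ℤ) := by
  intro n
  induction n using Nat.strong_induction_on with
  | _ n ih =>
    intro hn fuel hf x
    obtain ⟨fuel, rfl⟩ : ∃ f', fuel = f' + 1 := ⟨fuel - 1, by omega⟩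
    rw [rdfWhile]
    have hmodc : PySem.Int.mod (n : ℤ) (p : ℤ) = ((n % p : ℕ) : ℤ) := PySem.Int.mod_natCast n p
    have hdivc : PySem.Int.floordiv (n : ℤ) (p : ℤ) = ((n / p : ℕ) : ℤ) := PySem.Int.floordiv_natCast n p
    have hp2 := hp.two_le
    by_cases hdvd : p ∣ n
    · have hr : PySem.Int.mod (n : ℤ) (p : ℤ) = 0 := by
        rw [hmodc, Nat.eq_zero_of_dvd_of_lt hdvd |> fun _ => Nat.mod_eq_zero_of_dvd hdvd]; rfl
      rw [if_pos hr, hdivc]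
      have h1 : 1 ≤ n / p := Nat.one_le_div_iff (by omega) |>.mpr (Nat.le_of_dvd (by omega) hdvd)
      have hlt : n / p < n := Nat.div_lt_self (by omega) (by omega)
      rw [ih (n / p) hlt h1 fuel (by omega) (x + 1)]
      have hfac : (n / p).factorization p = n.factorization p - 1 := by
        rw [Nat.factorization_div hdvd]
        simp [hp.factorization_self]
      have hpos : 0 < n.factorization p := hp.factorization_pos_of_dvd (by omega) hdvd
      rw [hfac, Nat.cast_sub (by omega : 1 ≤ n.factorization p)]
      push_cast
      ring
    · have hr : PySem.Int.mod (n : ℤ) (p : ℤ) ≠ 0 := by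
        rw [hmodc]
        exact_mod_cast fun h => hdvd (Nat.dvd_of_mod_eq_zero (by exact_mod_cast h))
      rw [if_neg hr, Nat.factorization_eq_zero_of_not_dvd hdvd]
      simp

theorem rdfX_spec (p n : ℕ) (hp : p.Prime) (hn : 1 ≤ n) :
    rdfX (p : ℤ) (n : ℤ) = (n.factorization p : ℤ) + 1 := by
  rw [rdfX]
  have : ((n : ℤ)).natAbs = n := Int.natAbs_natCast n
  rw [this, rdfWhile_spec p hp n hn (n + 1) (by omega) 1]
  ring

theorem sigma1_pp (p k : ℕ) (hp : p.Prime) :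
    sigma1 (p ^ k) = ∑ i ∈ Finset.range (k + 1), p ^ i := by
  rw [sigma1, Nat.divisors_prime_pow hp, Finset.sum_map]
  rfl

theorem one_lt_sigma1_pp (p k : ℕ) (hp : p.Prime) (hk : 1 ≤ k) : 1 < sigma1 (p ^ k) := by
  rw [sigma1_pp p k hp]
  have h := Finset.sum_range_succ' (fun i => p ^ i) k
  have hpos : 0 < ∑ i ∈ Finset.range k, p ^ (i + 1) := by
    apply Finset.sum_pos
    · intro i _
      exact Nat.pow_pos hp.pos
    · exact Finset.nonempty_range_iff.mpr (by omega)
  simp only [pow_zero] at h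
  omega

theorem geom_div (p : ℕ) (hp : 2 ≤ p) (k : ℕ) :
    PySem.Int.floordiv ((p : ℤ) ^ (k + 1) - 1) ((p : ℤ) - 1) =
      ∑ i ∈ Finset.range (k + 1), (p : ℤ) ^ i := by
  have hpos : (0 : ℤ) < (p : ℤ) - 1 := by omega
  rw [PySem.Int.floordiv_eq_ediv_of_pos hpos, ← geom_sum_mul ((p : ℤ)) (k + 1)]
  exact Int.mul_ediv_cancel _ (by omega)

theorem sigma1_eq_prod (m : ℕ) (hm : m ≠ 0) :
    sigma1 m = ∏ p ∈ m.primeFactors, sigma1 (p ^ m.factorization p) := by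
  have h := (ArithmeticFunction.isMultiplicative_sigma (k := 1)).multiplicative_factorization
      (ArithmeticFunction.sigma 1) hm
  have hs : ∀ n, sigma1 n = ArithmeticFunction.sigma 1 n := by
    intro n; rw [ArithmeticFunction.sigma_one_apply, sigma1]
  rw [hs, h, Finsupp.prod, Nat.support_factorization]
  exact Finset.prod_congr rfl (fun p _ => (hs _).symm)

theorem PA_large (a j : ℕ) (hj : j ≠ 0) (hja : j < a) : PA a j = sigma1 j := by
  rw [PA, sigma1_eq_prod j hj]
  congr 1
  apply Finset.filter_true_of_mem
  intro p hp
  right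
  have := Nat.le_of_mem_primeFactors hp
  omega

theorem PA_start (j : ℕ) (hj : j ≠ 0) :
    PA 3 j = if 2 ∣ j then sigma1 (2 ^ j.factorization 2) else 1 := by
  rw [PA]
  have hfe : j.primeFactors.filter (fun p => p = 2 ∨ p < 3) = j.primeFactors.filter (fun p => p = 2) := by
    apply Finset.filter_congr
    intro p hp
    have := (Nat.mem_primeFactors.mp hp).1.two_le
    omega
  rw [hfe, Finset.filter_eq']
  by_cases h2 : 2 ∣ j
  · have : 2 ∈ j.primeFactors := Nat.mem_primeFactors.mpr ⟨Nat.prime_two, h2, hj⟩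
    rw [if_pos this, if_pos h2, Finset.prod_singleton]
  · have : 2 ∉ j.primeFactors := fun hc => h2 (Nat.mem_primeFactors.mp hc).2.1
    rw [if_neg this, if_neg h2, Finset.prod_empty]

theorem PA_step_prime (n j : ℕ) (hn : n.Prime) (hodd : n % 2 = 1) :
    PA (n + 2) j = if n ∈ j.primeFactors then PA n j * sigma1 (n ^ j.factorization n) else PA n j := by
  have hsplit : j.primeFactors.filter (fun p => p = 2 ∨ p < n + 2) =
      if n ∈ j.primeFactors then insert n (j.primeFactors.filter (fun p => p = 2 ∨ p < n))
      else j.primeFactors.filter (fun p => p = 2 ∨ p < n) := by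
    have h3 : 3 ≤ n := by have := hn.two_le; omega
    ext p
    by_cases hmem : n ∈ j.primeFactors
    · rw [if_pos hmem]
      simp only [Finset.mem_filter, Finset.mem_insert]
      constructor
      · rintro ⟨hpf, hc⟩
        by_cases hpn : p = n
        · exact Or.inl hpn
        · refine Or.inr ⟨hpf, ?_⟩
          -- p ≠ n, p prime; p < n+2 means p < n or p ∈ {n, n+1}; n+1 is even > 2, not prime
          have hpprime := (Nat.mem_primeFactors.mp hpf).1
          rcases hc with h | h
          · exact Or.inl h
          · right
            rcases Nat.lt_or_ge p n with h' | h'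
            · exact h'
            · exfalso
              have hpn1 : p = n + 1 := by omega
              have h2p : 2 ∣ p := by omega
              rcases hpprime.eq_one_or_self_of_dvd 2 h2p with h2 | h2 <;> omega
      · rintro (rfl | ⟨hpf, hc⟩)
        · exact ⟨hmem, Or.inr (by omega)⟩
        · exact ⟨hpf, by rcases hc with h | h; exact Or.inl h; exact Or.inr (by omega)⟩
    · rw [if_neg hmem]
      simp only [Finset.mem_filter]
      constructor
      · rintro ⟨hpf, hc⟩
        refine ⟨hpf, ?_⟩
        have hpprime := (Nat.mem_primeFactors.mp hpf).1
        rcases hc with h | h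
        · exact Or.inl h
        · right
          rcases Nat.lt_or_ge p n with h' | h'
          · exact h'
          · exfalso
            have hpn : p = n ∨ p = n + 1 := by omega
            rcases hpn with h' | h'
            · exact hmem (h' ▸ hpf)
            · have h2p : 2 ∣ p := by omega
              rcases hpprime.eq_one_or_self_of_dvd 2 h2p with h2 | h2 <;> omega
      · rintro ⟨hpf, hc⟩
        exact ⟨hpf, by rcases hc with h | h; exact Or.inl h; exact Or.inr (by omega)⟩
  rw [PA, hsplit]
  by_cases hmem : n ∈ j.primeFactors
  · rw [if_pos hmem, if_pos hmem, Finset.prod_insert (by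
      simp only [Finset.mem_filter, not_and, not_or]
      intro _
      omega), PA, mul_comm]
  · rw [if_neg hmem, if_neg hmem, PA]

theorem PA_step_notprime (n j : ℕ) (hn : ¬ n.Prime) (h3 : 3 ≤ n) (hodd : n % 2 = 1) :
    PA (n + 2) j = PA n j := by
  rw [PA, PA]
  apply Finset.prod_congr _ (fun _ _ => rfl)
  apply Finset.filter_congr
  intro p hp
  have hpprime := (Nat.mem_primeFactors.mp hp).1
  constructor
  · rintro (h | h)
    · exact Or.inl h
    · right
      rcases Nat.lt_or_ge p n with h' | h'
      · exact h'
      · exfalso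
        have hpn : p = n ∨ p = n + 1 := by omega
        rcases hpn with h'' | h''
        · exact hn (h'' ▸ hpprime)
        · have h2p : 2 ∣ p := by omega
          rcases hpprime.eq_one_or_self_of_dvd 2 h2p with h2 | h2 <;> omega
  · rintro (h | h)
    · exact Or.inl h
    · exact Or.inr (by omega)

theorem PA_eq_one_iff (n : ℕ) (h3 : 3 ≤ n) (hodd : n % 2 = 1) : PA n n = 1 ↔ n.Prime := by
  constructor
  · intro h1
    by_contra hnp
    -- n has a prime factor < n
    have hm : n.minFac.Prime := Nat.minFac_prime (by omega)
    have hmd : n.minFac ∣ n := Nat.minFac_dvd n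
    have hmlt : n.minFac < n := by
      rcases Nat.lt_or_ge n.minFac n with h | h
      · exact h
      · exfalso
        have : n.minFac ≤ n := Nat.le_of_dvd (by omega) hmd
        have heq : n.minFac = n := by omega
        exact hnp (Nat.prime_def_minFac.mpr ⟨by omega, heq⟩)
    have hmem : n.minFac ∈ n.primeFactors.filter (fun p => p = 2 ∨ p < n) :=
      Finset.mem_filter.mpr ⟨Nat.mem_primeFactors.mpr ⟨hm, hmd, by omega⟩, Or.inr hmlt⟩
    have hone : ∀ p ∈ n.primeFactors.filter (fun p => p = 2 ∨ p < n),
        1 < sigma1 (p ^ n.factorization p) := by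
      intro p hp
      have hpf := Finset.mem_filter.mp hp |>.1
      have hpprime := (Nat.mem_primeFactors.mp hpf).1
      exact one_lt_sigma1_pp p _ hpprime
        (Nat.Prime.factorization_pos_of_dvd hpprime (by omega) (Nat.mem_primeFactors.mp hpf).2.1)
    have hlt : 1 < PA n n := by
      rw [PA]
      calc 1 < sigma1 (n.minFac ^ n.factorization n.minFac) := hone _ hmem
        _ ≤ _ := Finset.single_le_prod' (fun p hp => le_of_lt (hone p hp)) hmem
    omega
  · intro hprime
    rw [PA]
    have : n.primeFactors.filter (fun p => p = 2 ∨ p < n) = ∅ := by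
      rw [hprime.primeFactors]
      ext p
      simp only [Finset.mem_filter, Finset.mem_singleton, Finset.notMem_empty, iff_false]
      rintro ⟨rfl, h | h⟩ <;> omega
    rw [this, Finset.prod_empty]

theorem BV_final (a j N : ℕ) (hj : j < N) (ha : N ≤ a) :
    BV a j = ∑ i ∈ j.properDivisors, i := by
  rw [BV, ← Finset.sum_filter]
  apply Finset.sum_congr _ (fun _ _ => rfl)
  ext x
  simp only [Finset.mem_filter, Finset.mem_range, Nat.mem_properDivisors]
  constructor
  · rintro ⟨_, hd, hlt⟩; exact ⟨hd, hlt⟩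
  · rintro ⟨hd, hlt⟩; exact ⟨by omega, hd, hlt⟩

theorem sigma1_sub (j : ℕ) :
    (if j = 0 then 0 else (sigma1 j : ℤ)) - (j : ℤ) = ((∑ i ∈ j.properDivisors, i : ℕ) : ℤ) := by
  rcases eq_or_ne j 0 with rfl | hj
  · simp
  · rw [if_neg hj, sigma1]
    have := Nat.sum_divisors_eq_sum_properDivisors_add_self (n := j)
    push_cast [this]
    ring


theorem pyRange_pos_nil {a b s : ℤ} (h : b ≤ a) (hs : 0 < s) : PySem.List.pyRange a b s = [] := by
  rw [PySem.List.pyRange_of_pos a b hs, if_neg (by omega), List.range_zero, List.map_nil]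

theorem factor_even (n : ℕ) (hn : 1 ≤ n) :
    (2 : ℤ) ^ (rdfX 2 (n : ℤ)).toNat - 1 = (sigma1 (2 ^ n.factorization 2) : ℤ) := by
  have h := rdfX_spec 2 n Nat.prime_two hn
  norm_num at h
  have h2 : rdfX 2 ((n : ℤ)) = ((n.factorization 2 + 1 : ℕ) : ℤ) := by rw [h]; push_cast; ring
  rw [h2, Int.toNat_natCast, sigma1_pp 2 _ Nat.prime_two]
  push_cast
  rw [← geom_sum_mul (2 : ℤ) (n.factorization 2 + 1)]
  norm_num

theorem factor_odd (p m : ℕ) (hp : p.Prime) (hm : 1 ≤ m) :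
    PySem.Int.floordiv ((p : ℤ) ^ (rdfX (p : ℤ) (m : ℤ)).toNat - 1) ((p : ℤ) - 1) =
      (sigma1 (p ^ m.factorization p) : ℤ) := by
  have h := rdfX_spec p m hp hm
  have h2 : rdfX (p : ℤ) ((m : ℤ)) = ((m.factorization p + 1 : ℕ) : ℤ) := by rw [h]; push_cast; ring
  rw [h2, Int.toNat_natCast, geom_div p hp.two_le (m.factorization p), sigma1_pp p _ hp]
  push_cast
  rfl

-- B's outer loop, from divisor d on
theorem loopB (limit : ℤ) (hl : 1 ≤ limit) :
    ∀ (fuel : ℕ) (d : ℤ) (s : List ℤ), 1 ≤ d → (limit - d).toNat ≤ fuel →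
      s.length = limit.toNat →
      (∀ j < limit.toNat, s.getD j 0 = (BV d.toNat j : ℤ)) →
      ((PySem.List.pyRange d limit 1).foldl (fun s d =>
          (PySem.List.pyRange (2 * d) limit d).foldl (fun s m =>
              PySem.List.pySetD s m (PySem.List.pyGetD s m 0 + d)) s) s).length = limit.toNat ∧
      ∀ j < limit.toNat,
        ((PySem.List.pyRange d limit 1).foldl (fun s d =>
            (PySem.List.pyRange (2 * d) limit d).foldl (fun s m =>
                PySem.List.pySetD s m (PySem.List.pyGetD s m 0 + d)) s) s).getD j 0 =
          ((∑ i ∈ j.properDivisors, i : ℕ) : ℤ) := by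
  intro fuel
  induction fuel with
  | zero =>
    intro d s hd hf hlen hinv
    have hdl : limit ≤ d := by omega
    rw [PySem.List.pyRange_one_eq_nil hdl]
    refine ⟨hlen, fun j hj => ?_⟩
    rw [List.foldl_nil, hinv j hj, BV_final d.toNat j limit.toNat hj (by omega)]
  | succ fuel ih =>
    intro d s hd hf hlen hinv
    by_cases hdl : d < limit
    · rw [PySem.List.pyRange_one_cons hdl, List.foldl_cons]
      have hnd : (PySem.List.pyRange (2 * d) limit d).Nodup := nodup_pyRange_pos _ _ _ (by omega)
      have hbnd : ∀ i ∈ PySem.List.pyRange (2 * d) limit d, 0 ≤ i ∧ i < (s.length : ℤ) := by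
        intro i hi
        rw [(PySem.List.mem_pyRange_iff_of_pos (by omega) i)] at hi
        constructor <;> omega
      obtain ⟨hlen', hget'⟩ := scatter (fun i old => old + d) (PySem.List.pyRange (2 * d) limit d) s hnd hbnd
      apply ih (d + 1) _ (by omega) (by omega) (by rw [hlen']; exact hlen)
      intro j hj
      rw [hget' j (by omega), hinv j hj]
      have hd1 : (d + 1).toNat = d.toNat + 1 := by omega
      have hstep : BV (d.toNat + 1) j = BV d.toNat j + (if d.toNat ∣ j ∧ d.toNat < j then d.toNat else 0) := by
        rw [BV, BV, Finset.sum_range_succ]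
      rw [hd1, hstep]
      have hmem : (j : ℤ) ∈ PySem.List.pyRange (2 * d) limit d ↔ (d.toNat ∣ j ∧ d.toNat < j) := by
        rw [PySem.List.mem_pyRange_iff_of_pos (by omega)]
        constructor
        · rintro ⟨h1, h2, h3⟩
          have hdj : d ∣ (j : ℤ) := by
            have := dvd_add h3 (Dvd.intro 2 (by ring : d * 2 = 2 * d))
            simpa using this
          have hdj' : d.toNat ∣ j := by
            have : ((d.toNat : ℤ)) ∣ ((j : ℤ)) := by rwa [show ((d.toNat : ℤ)) = d by omega]
            exact_mod_cast this
          exact ⟨hdj', by omega⟩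
        · rintro ⟨h1, h2⟩
          have h2d : 2 * d.toNat ≤ j := by
            obtain ⟨k, rfl⟩ := h1
            rcases Nat.lt_or_ge k 2 with hk | hk
            · interval_cases k <;> omega
            · calc 2 * d.toNat ≤ d.toNat * k := by nlinarith
                _ = d.toNat * k := rfl
          have hdj : d ∣ (j : ℤ) := by
            have : ((d.toNat : ℤ)) ∣ ((j : ℤ)) := Int.natCast_dvd_natCast.mpr h1
            rwa [show ((d.toNat : ℤ)) = d by omega] at this
          refine ⟨by omega, by omega, ?_⟩
          exact dvd_sub hdj (Dvd.intro 2 (by ring : d * 2 = 2 * d))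
      by_cases hc : d.toNat ∣ j ∧ d.toNat < j
      · rw [if_pos (hmem.mpr hc), if_pos hc]
        push_cast
        omega
      · rw [if_neg (fun h => hc (hmem.mp h)), if_neg hc]
        push_cast
        omega
    · rw [pyRange_pos_nil (by omega) (by omega), List.foldl_nil]
      refine ⟨hlen, fun j hj => ?_⟩
      rw [hinv j hj, BV_final d.toNat j limit.toNat hj (by omega)]

-- A's odd-prime pass, from odd n on
theorem loopA (limit : ℤ) (hl : 1 ≤ limit) :
    ∀ (fuel : ℕ) (n : ℤ) (s : List ℤ), 3 ≤ n → n % 2 = 1 → (limit - n).toNat ≤ fuel →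
      s.length = limit.toNat →
      (∀ j < limit.toNat, s.getD j 0 = if j = 0 then 0 else (PA n.toNat j : ℤ)) →
      ((PySem.List.pyRange n limit 2).foldl (fun s n =>
          if PySem.List.pyGetD s n 0 = 1 then
            let d := n - 1
            (PySem.List.pyRange n limit n).foldl (fun s m =>
                let x := rdfX n m
                PySem.List.pySetD s m (PySem.List.pyGetD s m 0 *
                  PySem.Int.floordiv (n ^ x.toNat - 1) d)) s
          else s) s).length = limit.toNat ∧
      ∀ j < limit.toNat,
        ((PySem.List.pyRange n limit 2).foldl (fun s n =>
            if PySem.List.pyGetD s n 0 = 1 then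
              let d := n - 1
              (PySem.List.pyRange n limit n).foldl (fun s m =>
                  let x := rdfX n m
                  PySem.List.pySetD s m (PySem.List.pyGetD s m 0 *
                    PySem.Int.floordiv (n ^ x.toNat - 1) d)) s
            else s) s).getD j 0 = if j = 0 then 0 else (sigma1 j : ℤ) := by
  intro fuel
  induction fuel with
  | zero =>
    intro n s h3 hodd hf hlen hinv
    have hnl : limit ≤ n := by omega
    rw [pyRange_pos_nil hnl (by omega), List.foldl_nil]
    refine ⟨hlen, fun j hj => ?_⟩
    rw [hinv j hj]
    rcases eq_or_ne j 0 with rfl | hj0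
    · simp
    · rw [if_neg hj0, if_neg hj0, PA_large n.toNat j hj0 (by omega)]
  | succ fuel ih =>
    intro n s h3 hodd hf hlen hinv
    by_cases hnl : n < limit
    · rw [pyRange_two_cons hnl, List.foldl_cons]
      have hnn3 : 3 ≤ n.toNat := by omega
      have hnnodd : n.toNat % 2 = 1 := by omega
      have hnn0 : n.toNat ≠ 0 := by omega
      have hcast : ((n.toNat : ℤ)) = n := by omega
      -- the branch test reads sieve[n]
      have hread : PySem.List.pyGetD s n 0 = (PA n.toNat n.toNat : ℤ) := by
        rw [PySem.List.pyGetD_eq_getElem s 0 (by omega) (by rw [hlen]; omega : n < (s.length : ℤ)),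
          ← List.getD_eq_getElem s 0 (by omega : n.toNat < s.length), hinv n.toNat (by omega),
          if_neg hnn0]
      by_cases hprime : n.toNat.Prime
      · have htest : PySem.List.pyGetD s n 0 = 1 := by
          rw [hread, (PA_eq_one_iff n.toNat hnn3 hnnodd).mpr hprime]
          norm_num
        rw [if_pos htest]
        have hnd : (PySem.List.pyRange n limit n).Nodup := nodup_pyRange_pos _ _ _ (by omega)
        have hbnd : ∀ i ∈ PySem.List.pyRange n limit n, 0 ≤ i ∧ i < (s.length : ℤ) := by
          intro i hi
          rw [(PySem.List.mem_pyRange_iff_of_pos (by omega) i)] at hi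
          constructor <;> omega
        obtain ⟨hlen', hget'⟩ := scatter
          (fun i old => old * PySem.Int.floordiv (n ^ (rdfX n i).toNat - 1) (n - 1))
          (PySem.List.pyRange n limit n) s hnd hbnd
        apply ih (n + 2) _ (by omega) (by omega) (by omega) (by rw [hlen']; exact hlen)
        intro j hj
        rw [hget' j (by omega), hinv j hj]
        have hn2 : (n + 2).toNat = n.toNat + 2 := by omega
        have hmem : (j : ℤ) ∈ PySem.List.pyRange n limit n ↔ (n.toNat ∣ j ∧ j ≠ 0) := by
          rw [PySem.List.mem_pyRange_iff_of_pos (by omega)]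
          constructor
          · rintro ⟨h1, h2, h3'⟩
            have hdj : n ∣ (j : ℤ) := by
              have := dvd_add h3' (dvd_refl n)
              simpa using this
            have hdj' : n.toNat ∣ j := by
              have : ((n.toNat : ℤ)) ∣ ((j : ℤ)) := by rwa [hcast]
              exact_mod_cast this
            exact ⟨hdj', by omega⟩
          · rintro ⟨h1, h2⟩
            have hle : n.toNat ≤ j := Nat.le_of_dvd (by omega) h1
            have hdj : n ∣ (j : ℤ) := by
              have : ((n.toNat : ℤ)) ∣ ((j : ℤ)) := Int.natCast_dvd_natCast.mpr h1
              rwa [hcast] at this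
            exact ⟨by omega, by omega, (dvd_sub hdj (dvd_refl n))⟩
        rcases eq_or_ne j 0 with rfl | hj0
        · rw [if_neg (fun h => by
              have := (hmem.mp h).2
              exact this rfl), if_pos rfl, if_pos rfl]
        · rw [if_neg hj0, hn2, if_neg hj0]
          by_cases hdvd : n.toNat ∣ j
          · rw [if_pos (hmem.mpr ⟨hdvd, hj0⟩),
              PA_step_prime n.toNat j hprime hnnodd,
              if_pos (Nat.mem_primeFactors.mpr ⟨hprime, hdvd, hj0⟩)]
            have hfo := factor_odd n.toNat j hprime (by omega)
            rw [hcast] at hfo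
            rw [hfo]
            push_cast
            ring
          · rw [if_neg (fun h => hdvd (hmem.mp h).1),
              PA_step_prime n.toNat j hprime hnnodd,
              if_neg (fun h => hdvd (Nat.mem_primeFactors.mp h).2.1)]
      · have htest : ¬ (PySem.List.pyGetD s n 0 = 1) := by
          rw [hread]
          intro h
          exact hprime ((PA_eq_one_iff n.toNat hnn3 hnnodd).mp (by exact_mod_cast h))
        rw [if_neg htest]
        apply ih (n + 2) _ (by omega) (by omega) (by omega) hlen
        intro j hj
        rw [hinv j hj]
        rcases eq_or_ne j 0 with rfl | hj0
        · rw [if_pos rfl, if_pos rfl]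
        · rw [if_neg hj0, if_neg hj0, show (n + 2).toNat = n.toNat + 2 by omega,
            PA_step_notprime n.toNat j hprime hnn3 hnnodd]
    · rw [pyRange_pos_nil (by omega) (by omega), List.foldl_nil]
      refine ⟨hlen, fun j hj => ?_⟩
      rw [hinv j hj]
      rcases eq_or_ne j 0 with rfl | hj0
      · simp
      · rw [if_neg hj0, if_neg hj0, PA_large n.toNat j hj0 (by omega)]

-- A's list equals the target
theorem rdf_eq_tgt (limit : ℤ) (hl : 1 ≤ limit) : rdf limit = tgt limit.toNat := by
  have hN : ((limit.toNat : ℤ)) = limit := by omega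
  -- stage 0
  set s0 : List ℤ := PySem.List.pySetD (List.replicate limit.toNat 1) 0 0 with hs0
  have hlen0 : s0.length = limit.toNat := by rw [hs0, PySem.List.length_pySetD, List.length_replicate]
  have hget0 : ∀ j < limit.toNat, s0.getD j 0 = if j = 0 then 0 else 1 := by
    intro j hj
    rw [hs0, PySem.List.pySetD_of_nonneg _ _ (by omega)]
    rcases eq_or_ne j 0 with rfl | hj0
    · rw [if_pos rfl]
      rw [List.getD_eq_getElem _ _ (by simpa using hj), List.getElem_set]
      simp
    · rw [if_neg hj0]
      rw [List.getD_eq_getElem _ _ (by simpa using hj), List.getElem_set, if_neg (by omega)]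
      simp
  -- stage 1 : even pass
  have hnd1 : (PySem.List.pyRange 2 limit 2).Nodup := nodup_pyRange_pos _ _ _ (by omega)
  have hbnd1 : ∀ i ∈ PySem.List.pyRange 2 limit 2, 0 ≤ i ∧ i < (s0.length : ℤ) := by
    intro i hi
    rw [(PySem.List.mem_pyRange_iff_of_pos (by omega) i)] at hi
    constructor <;> omega
  obtain ⟨hlen1, hget1⟩ := scatter (fun i old => old * ((2 : ℤ) ^ (rdfX 2 i).toNat - 1))
    (PySem.List.pyRange 2 limit 2) s0 hnd1 hbnd1
  set s1 : List ℤ := (PySem.List.pyRange 2 limit 2).foldl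
    (fun t i => PySem.List.pySetD t i
      ((fun i old => old * ((2 : ℤ) ^ (rdfX 2 i).toNat - 1)) i (PySem.List.pyGetD t i 0))) s0 with hs1
  have hlen1' : s1.length = limit.toNat := by rw [hlen1, hlen0]
  have hget1' : ∀ j < limit.toNat, s1.getD j 0 = if j = 0 then 0 else (PA 3 j : ℤ) := by
    intro j hj
    rw [hget1 j (by omega), hget0 j hj]
    rcases eq_or_ne j 0 with rfl | hj0
    · rw [if_pos rfl, if_pos rfl,
        if_neg (fun h => by
          rw [(PySem.List.mem_pyRange_iff_of_pos (by omega) _)] at h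
          omega)]
    · rw [if_neg hj0, if_neg hj0, PA_start j hj0]
      have hmem : (j : ℤ) ∈ PySem.List.pyRange 2 limit 2 ↔ 2 ∣ j := by
        rw [PySem.List.mem_pyRange_iff_of_pos (by omega)]
        constructor
        · rintro ⟨h1, h2, h3⟩
          have : (2 : ℤ) ∣ (j : ℤ) := by
            have := dvd_add h3 (dvd_refl 2)
            simpa using this
          exact_mod_cast this
        · intro h
          have h2 : 2 ≤ j := by
            rcases Nat.lt_or_ge j 2 with h' | h'
            · interval_cases j <;> omega
            · exact h'
          refine ⟨by omega, by omega, ?_⟩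
          have : (2 : ℤ) ∣ (j : ℤ) := Int.natCast_dvd_natCast.mpr h
          exact dvd_sub this (dvd_refl 2)
      by_cases hdvd : 2 ∣ j
      · rw [if_pos (hmem.mpr hdvd), if_pos hdvd, factor_even j (by omega), one_mul]
      · rw [if_neg (fun h => hdvd (hmem.mp h)), if_neg hdvd]
        norm_num
  -- stage 2 : odd pass
  obtain ⟨hlen2, hget2⟩ := loopA limit hl (limit - 3).toNat 3 s1 (by omega) (by omega) (by omega)
    hlen1' hget1'
  set s2 : List ℤ := (PySem.List.pyRange 3 limit 2).foldl (fun s n =>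
      if PySem.List.pyGetD s n 0 = 1 then
        let d := n - 1
        (PySem.List.pyRange n limit n).foldl (fun s m =>
            let x := rdfX n m
            PySem.List.pySetD s m (PySem.List.pyGetD s m 0 *
              PySem.Int.floordiv (n ^ x.toNat - 1) d)) s
      else s) s1 with hs2
  -- stage 3 : subtraction pass
  have hnd3 : (PySem.List.pyRange 0 limit 1).Nodup := nodup_pyRange_pos _ _ _ (by omega)
  have hbnd3 : ∀ i ∈ PySem.List.pyRange 0 limit 1, 0 ≤ i ∧ i < (s2.length : ℤ) := by
    intro i hi
    rw [PySem.List.mem_pyRange_one] at hi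
    rw [hlen2]
    constructor <;> omega
  obtain ⟨hlen3, hget3⟩ := scatter (fun i old => old - i) (PySem.List.pyRange 0 limit 1) s2 hnd3 hbnd3
  -- assemble
  show (PySem.List.pyRange 0 limit 1).foldl
    (fun t i => PySem.List.pySetD t i
      ((fun i old => old - i) i (PySem.List.pyGetD t i 0))) s2 = tgt limit.toNat
  apply List.ext_getElem
  · rw [hlen3, hlen2]
    simp [tgt]
  · intro j hjl hjr
    have hj : j < limit.toNat := by rwa [hlen3, hlen2] at hjl
    rw [← List.getD_eq_getElem _ 0 hjl, hget3 j (by rw [hlen2]; exact hj),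
      if_pos (by rw [PySem.List.mem_pyRange_one]; omega),
      hget2 j hj]
    simp only [tgt, List.getElem_map, List.getElem_range]
    exact sigma1_sub j

-- B's list equals the target
theorem rdf_alt_eq_tgt (limit : ℤ) (hl : 1 ≤ limit) : rdf_alt limit = tgt limit.toNat := by
  have hinv0 : ∀ j < limit.toNat, (List.replicate limit.toNat (0 : ℤ)).getD j 0 = (BV 1 j : ℤ) := by
    intro j hj
    rw [List.getD_eq_getElem _ _ (by simpa using hj), List.getElem_replicate, BV]
    simp
  obtain ⟨hlen, hget⟩ := loopB limit hl (limit - 1).toNat 1 (List.replicate limit.toNat 0)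
    (by omega) (by omega) (by simp) hinv0
  show (PySem.List.pyRange 1 limit 1).foldl (fun s d =>
      (PySem.List.pyRange (2 * d) limit d).foldl (fun s m =>
          PySem.List.pySetD s m (PySem.List.pyGetD s m 0 + d)) s)
    (List.replicate limit.toNat 0) = tgt limit.toNat
  apply List.ext_getElem
  · rw [hlen]
    simp [tgt]
  · intro j hjl hjr
    have hj : j < limit.toNat := by rwa [hlen] at hjl
    rw [← List.getD_eq_getElem _ 0 hjl, hget j hj]
    simp only [tgt, List.getElem_map, List.getElem_range]


-- ===== VERDICT (by name: the statement is the Claim_ definition above) =====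
theorem rdf_spec : Claim_equal_rdf := by
  intro limit _ hpre
  unfold Spec_rdf
  rw [rdf_eq_tgt limit hpre, rdf_alt_eq_tgt limit hpre]
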